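-- pv_equiv track=rewrite | github.com/xpqz/aoc-16 | day24.py | traverse_mst2
-- ===== SOURCE A (Python) =====
-- def traverse_mst2(costed_graph, tree, node):
--     """
--     Visit nodes with more children first.
--     """
--     yield node
--
--     child_nodes = []
--     for n in tree[node]:
--         ch_count = len(tree[n])
--         cost = costed_graph[node][n]
--         child_nodes.append((2-ch_count, cost, n))
--
--     for _, _, n in sorted(child_nodes):
--         yield from traverse_mst2(costed_graph, tree, n)
-- ===== SOURCE B (Python) =====
-- def traverse_mst2(costed_graph, tree, node):
--     """
--     Visit nodes with more children first.
--     Iterative preorder DFS with an explicit stack: children are pushed in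
--     reverse sorted order so they are popped (and yielded) in ascending order.
--     """
--     stack = [node]
--     while stack:
--         n0 = stack.pop()
--         yield n0
--         children = [(2 - len(tree[c]), costed_graph[n0][c], c) for c in tree[n0]]
--         for _, _, c in sorted(children, reverse=True):
--             stack.append(c)
-- ===== Notes on version B (the rewrite author's own statement) =====
-- stated objective: alternative
-- what changed: Replaces the recursive generator (yield + sorted children + yield from) by an iterative preorder DFS with an explicit stack, pushing each node's children in reverse sorted order so they are popped in ascending order.
import Mathlib
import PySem

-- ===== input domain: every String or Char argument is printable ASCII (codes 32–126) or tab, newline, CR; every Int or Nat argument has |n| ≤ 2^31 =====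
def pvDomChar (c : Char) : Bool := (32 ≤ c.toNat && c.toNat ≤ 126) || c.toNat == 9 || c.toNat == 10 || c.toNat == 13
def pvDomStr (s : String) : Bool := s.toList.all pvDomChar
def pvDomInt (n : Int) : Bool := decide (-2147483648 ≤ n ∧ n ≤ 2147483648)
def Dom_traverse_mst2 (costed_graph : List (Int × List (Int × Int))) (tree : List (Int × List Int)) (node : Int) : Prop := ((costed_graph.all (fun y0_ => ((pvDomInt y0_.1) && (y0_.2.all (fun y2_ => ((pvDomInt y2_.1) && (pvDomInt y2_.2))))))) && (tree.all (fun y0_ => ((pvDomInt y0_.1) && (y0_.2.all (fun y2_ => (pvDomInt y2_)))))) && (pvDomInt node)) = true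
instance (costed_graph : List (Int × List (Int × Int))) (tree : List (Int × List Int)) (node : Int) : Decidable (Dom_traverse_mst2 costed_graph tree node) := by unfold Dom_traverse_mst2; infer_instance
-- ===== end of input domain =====

-- B replaces A's recursive generator by an explicit-stack iterative preorder DFS (children pushed
-- in reverse sorted order), a different decomposition of the same traversal; equivalence of the
-- RETURN values is proved for all inputs of the ports (Pre_ excludes inputs where Python A raises).

-- ===== PORT A =====
-- Python's lexicographic comparison of int 3-tuples, as a sort key (Prod.Lex is exactly that order).
def pvKey3 (t : Int × Int × Int) : Lex (Int × Lex (Int × Int)) := toLex (t.1, toLex (t.2.1, t.2.2))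

-- the recursion of A, with a depth counter for totality only: tree.length + 1 never runs out on any
-- input admitted by Pre_traverse_mst2 (Python A itself diverges / raises RecursionError on the others)
def dfsA (costed_graph : List (Int × List (Int × Int))) (tree : List (Int × List Int)) : Nat → Int → List Int
  | 0, _ => []
  | d + 1, node =>
    let cs := (List.lookup node tree).getD []          -- tree[node] (KeyError excluded by Pre_)
    let child_nodes := cs.map (fun n =>
      ((2 : Int) - (((List.lookup n tree).getD []).length : Int),
       (List.lookup n ((List.lookup node costed_graph).getD [])).getD 0, n))
    node :: (PySem.List.sorted child_nodes pvKey3 false).flatMap (fun t => dfsA costed_graph tree d t.2.2)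

def traverse_mst2 (costed_graph : List (Int × List (Int × Int))) (tree : List (Int × List Int)) (node : Int) : List Int :=
  dfsA costed_graph tree (tree.length + 1) node

-- ===== PORT B =====
-- widest children list of the tree (bounds how much one step can push: termination measure only)
def maxW (tree : List (Int × List Int)) : Nat := (tree.map (fun p => p.2.length)).foldr max 0

theorem lookup_len_le_maxW (tree : List (Int × List Int)) (n : Int) :
    ((List.lookup n tree).getD []).length ≤ maxW tree := by
  induction tree with
  | nil => simp [List.lookup]
  | cons h t ih =>
    obtain ⟨k, v⟩ := h
    by_cases hk : n == k <;> simp [List.lookup, hk, maxW] at *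
    · right; exact ih

-- the while-stack loop of Source B; each stack entry carries the remaining depth budget (totality only,
-- mirroring dfsA's counter: never exhausted on inputs admitted by Pre_traverse_mst2)
def loopB (costed_graph : List (Int × List (Int × Int))) (tree : List (Int × List Int)) :
    List (Int × Nat) → List Int → List Int
  | [], out => out
  | (_, 0) :: rest, out => loopB costed_graph tree rest out
  | (n0, d + 1) :: rest, out =>
    let cs := (List.lookup n0 tree).getD []
    let children := cs.map (fun c =>
      ((2 : Int) - (((List.lookup c tree).getD []).length : Int),
       (List.lookup c ((List.lookup n0 costed_graph).getD [])).getD 0, c))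
    let desc := PySem.List.sorted children pvKey3 true
    loopB costed_graph tree (desc.reverse.map (fun t => (t.2.2, d)) ++ rest) (out ++ [n0])
  termination_by st _ => (st.map (fun p => (maxW tree + 1) ^ p.2)).sum
  decreasing_by
    · simp
    · simp only [List.map_append, List.sum_append, List.map_map, List.map_cons, List.sum_cons]
      have hlen : ((PySem.List.sorted
          (((List.lookup n0 tree).getD []).map (fun c =>
            ((2 : Int) - (((List.lookup c tree).getD []).length : Int),
             (List.lookup c ((List.lookup n0 costed_graph).getD [])).getD 0, c))) pvKey3 true).reverse.map
            ((fun p => (maxW tree + 1) ^ p.2) ∘ fun t => (t.2.2, d))).sum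
          ≤ maxW tree * (maxW tree + 1) ^ d := by
        have h1 : ∀ (l : List (Int × Int × Int)),
            (l.map ((fun (p : Int × Nat) => (maxW tree + 1) ^ p.2) ∘ fun t => (t.2.2, d))).sum
              = l.length * (maxW tree + 1) ^ d := by
          intro l; induction l with
          | nil => simp
          | cons h t ih => simp [ih]; ring
        rw [h1]
        have h2 : ((PySem.List.sorted
            (((List.lookup n0 tree).getD []).map (fun c =>
              ((2 : Int) - (((List.lookup c tree).getD []).length : Int),
               (List.lookup c ((List.lookup n0 costed_graph).getD [])).getD 0, c))) pvKey3 true).reverse).length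
            ≤ maxW tree := by
          rw [List.length_reverse, PySem.List.length_sorted, List.length_map]
          exact lookup_len_le_maxW tree n0
        exact Nat.mul_le_mul_right _ h2
      have hpow : maxW tree * (maxW tree + 1) ^ d < (maxW tree + 1) ^ (d + 1) := by
        have : (0:Nat) < (maxW tree + 1) ^ d := Nat.pow_pos (show 0 < maxW tree + 1 by omega)
        calc maxW tree * (maxW tree + 1) ^ d
            < (maxW tree + 1) * (maxW tree + 1) ^ d := by
              exact Nat.mul_lt_mul_of_lt_of_le (by omega) (le_refl _) this
          _ = (maxW tree + 1) ^ (d + 1) := by ring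
      simp only [Nat.succ_eq_add_one] at *
      omega

def traverse_mst2_alt (costed_graph : List (Int × List (Int × Int))) (tree : List (Int × List Int)) (node : Int) : List Int :=
  loopB costed_graph tree [(node, tree.length + 1)] []

-- ===== PRECONDITION & SPEC =====
-- the set of nodes reachable from s through the tree's child lists (closure; tree.length + 1
-- expansion rounds are enough, since distinct keys bound every distance)
def pvReach (tree : List (Int × List Int)) (s : List Int) : List Int :=
  (fun S => PySem.List.dedup (S ++ S.flatMap (fun k => (List.lookup k tree).getD [])))^[tree.length.succ] s

-- Pre_: exactly the inputs on which Python A returns — every node reachable from `node` is a key of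
-- `tree`, each of its children has a cost under its key in `costed_graph`, and no reachable node can
-- reach itself (otherwise Python raises KeyError or RecursionError).
def Pre_traverse_mst2 (costed_graph : List (Int × List (Int × Int))) (tree : List (Int × List Int)) (node : Int) : Prop :=
  ∀ k ∈ pvReach tree [node],
    (List.lookup k tree).isSome = true
    ∧ (∀ c ∈ (List.lookup k tree).getD [],
        (List.lookup c ((List.lookup k costed_graph).getD [])).isSome = true)
    ∧ k ∉ pvReach tree ((List.lookup k tree).getD [])
instance (costed_graph : List (Int × List (Int × Int))) (tree : List (Int × List Int)) (node : Int) : Decidable (Pre_traverse_mst2 costed_graph tree node) := by unfold Pre_traverse_mst2; infer_instance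

def pvWitness_traverse_mst2 : (List (Int × List (Int × Int))) × (List (Int × List Int)) × Int :=
  ([(1, [(2, 5), (3, 1)]), (2, []), (3, [])], ([(1, [2, 3]), (2, []), (3, [])], 1))

def Spec_traverse_mst2 (costed_graph : List (Int × List (Int × Int))) (tree : List (Int × List Int)) (node : Int) (out : List Int) : Prop := out = traverse_mst2_alt costed_graph tree node
instance (costed_graph : List (Int × List (Int × Int))) (tree : List (Int × List Int)) (node : Int) (out : List Int) : Decidable (Spec_traverse_mst2 costed_graph tree node out) := by unfold Spec_traverse_mst2; infer_instance

-- ===== CLAIM (what is proved, stated in full; the proofs are below) =====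
def Claim_equal_traverse_mst2 : Prop := ∀ (costed_graph : List (Int × List (Int × Int))) (tree : List (Int × List Int)) (node : Int), Dom_traverse_mst2 costed_graph tree node → Pre_traverse_mst2 costed_graph tree node → Spec_traverse_mst2 costed_graph tree node (traverse_mst2 costed_graph tree node)

-- ===== LEMMAS AND PROOFS =====

-- the key pvKey3 is injective (it repackages the whole triple), so reversing the descending
-- sort gives exactly the ascending sort
theorem pvKey3_injective : Function.Injective pvKey3 := by
  intro a b h
  simp [pvKey3, toLex, Prod.ext_iff] at h
  obtain ⟨h1, h2, h3⟩ := h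
  exact Prod.ext h1 (Prod.ext h2 h3)

theorem sorted_true_reverse (xs : List (Int × Int × Int)) :
    (PySem.List.sorted xs pvKey3 true).reverse = PySem.List.sorted xs pvKey3 false := by
  apply PySem.List.eq_of_perm_of_pairwise_le_of_injective pvKey3 pvKey3_injective
  · exact ((PySem.List.sorted xs pvKey3 true).reverse_perm.trans
      (PySem.List.sorted_perm xs pvKey3 true)).trans
      (PySem.List.sorted_perm xs pvKey3 false).symm
  · rw [List.pairwise_reverse]
    exact PySem.List.sorted_pairwise_rev xs pvKey3
  · exact PySem.List.sorted_pairwise xs pvKey3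

-- loop invariant: the stack loop emits, after the accumulator, the concatenation of the
-- recursive traversals of the stacked nodes (at their carried depth budgets)
theorem loopB_eq (costed_graph : List (Int × List (Int × Int))) (tree : List (Int × List Int)) :
    ∀ (st : List (Int × Nat)) (out : List Int),
      loopB costed_graph tree st out = out ++ st.flatMap (fun p => dfsA costed_graph tree p.2 p.1) := by
  intro st out
  fun_induction loopB costed_graph tree st out with
  | case1 out => simp
  | case2 n0 rest out ih => simp [ih, dfsA]
  | case3 n0 d rest out cs children desc ih =>
    rw [ih]
    simp only [List.flatMap_append, List.flatMap_map, List.flatMap_cons, List.append_assoc]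
    have : desc.reverse.flatMap (fun t => dfsA costed_graph tree d t.2.2)
        = (PySem.List.sorted children pvKey3 false).flatMap (fun t => dfsA costed_graph tree d t.2.2) := by
      rw [show desc.reverse = PySem.List.sorted children pvKey3 false from sorted_true_reverse children]
    rw [this]
    simp [dfsA, cs, children]

-- ===== VERDICT (by name: the statement is the Claim_ definition above) =====
theorem traverse_mst2_spec : Claim_equal_traverse_mst2 := by
  intro costed_graph tree node _ _
  unfold Spec_traverse_mst2 traverse_mst2 traverse_mst2_alt
  rw [loopB_eq]
  simp
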